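-- pv_equiv track=rewrite | github.com/Kareem-itani/foundations-cs-python | assignment_04_Karim_Itani/assignment_04_Karim_Itani.py | getSumTuples
-- ===== SOURCE A (Python) =====
-- def getSumTuples(tup1, tup2):
--
--     # Convert the two tuples to lists
--     lst1 = list(tup1)
--     lst2 = list(tup2)
--
--     # Find the larger list in length and extend the smaller one
--     if len(lst1) > len(lst2):
--         lenLarger = len(lst1)
--         lst2.extend([0] * (lenLarger - len(lst2)))
--     else:
--         lenLarger = len(lst2)
--         lst1.extend([0] * (lenLarger - len(lst1)))
--
--     # Initialize the list that contains the sum of the two lists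
--     lstSum = []
--
--     # fill up the list with the sum of the two lists
--     for i in range(lenLarger):
--         lstSum.append(lst1[i] + lst2[i])
--
--     # convert the final list to a tuple and return it
--     return tuple(lstSum)
-- ===== SOURCE B (Python) =====
-- def getSumTuples(tup1, tup2):
--     # Sum the aligned prefix with zip, then append whichever tail is left over
--     # (at most one of the two slices is non-empty).
--     return tuple(a + b for a, b in zip(tup1, tup2)) \
--         + tup1[len(tup2):] + tup2[len(tup1):]
-- ===== Notes on version B (the rewrite author's own statement) =====
-- stated objective: simpler
-- what changed: Replaces the length comparison, zero-padding extend and indexed range loop with a zipped-prefix sum plus the leftover tail slice of the longer tuple.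
import Mathlib
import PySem

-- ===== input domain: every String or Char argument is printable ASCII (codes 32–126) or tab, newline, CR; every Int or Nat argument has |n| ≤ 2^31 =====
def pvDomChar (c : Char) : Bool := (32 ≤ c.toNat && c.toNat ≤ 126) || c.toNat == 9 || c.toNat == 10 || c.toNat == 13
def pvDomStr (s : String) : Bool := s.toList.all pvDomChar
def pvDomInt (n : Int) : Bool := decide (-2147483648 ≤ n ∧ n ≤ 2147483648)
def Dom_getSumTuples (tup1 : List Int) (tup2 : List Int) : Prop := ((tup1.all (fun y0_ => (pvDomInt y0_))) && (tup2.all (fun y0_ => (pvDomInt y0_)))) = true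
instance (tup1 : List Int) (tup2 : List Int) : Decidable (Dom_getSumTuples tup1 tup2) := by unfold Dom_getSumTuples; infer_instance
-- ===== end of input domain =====

-- B replaces A's length comparison, zero-padding and indexed loop by summing the
-- zipped prefix and appending the leftover tail of the longer tuple (objective: simpler).

-- ===== PORT A =====
def getSumTuples (tup1 : List Int) (tup2 : List Int) : List Int :=
  -- lst1 = list(tup1); lst2 = list(tup2); pad the shorter with zeros
  let lst1 := tup1
  let lst2 := tup2
  let st :=
    if lst1.length > lst2.length then
      (lst1, lst2 ++ List.replicate (lst1.length - lst2.length) (0 : Int), lst1.length)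
    else
      (lst1 ++ List.replicate (lst2.length - lst1.length) (0 : Int), lst2, lst2.length)
  let l1 := st.1
  let l2 := st.2.1
  let lenLarger := st.2.2
  -- for i in range(lenLarger): lstSum.append(lst1[i] + lst2[i])
  (PySem.List.pyRange 0 (lenLarger : Int) 1).foldl
    (fun lstSum i => lstSum ++ [PySem.List.pyGetD l1 i 0 + PySem.List.pyGetD l2 i 0]) []

-- ===== PORT B =====
def getSumTuples_alt (tup1 : List Int) (tup2 : List Int) : List Int :=
  -- tuple(a + b for a, b in zip(tup1, tup2)) + tup1[len(tup2):] + tup2[len(tup1):]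
  List.zipWith (· + ·) tup1 tup2 ++ tup1.drop tup2.length ++ tup2.drop tup1.length

-- ===== PRECONDITION & SPEC =====
def Spec_getSumTuples (tup1 : List Int) (tup2 : List Int) (out : List Int) : Prop := out = getSumTuples_alt tup1 tup2
instance (tup1 : List Int) (tup2 : List Int) (out : List Int) : Decidable (Spec_getSumTuples tup1 tup2 out) := by unfold Spec_getSumTuples; infer_instance

-- ===== CLAIM (what is proved, stated in full; the proofs are below) =====
def Claim_equal_getSumTuples : Prop := ∀ (tup1 : List Int) (tup2 : List Int), Dom_getSumTuples tup1 tup2 → Spec_getSumTuples tup1 tup2 (getSumTuples tup1 tup2)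

-- ===== LEMMAS AND PROOFS =====

-- padding with zeros does not change getD-with-default-0
theorem getD_append_replicate_zero (a : List Int) (m k : Nat) :
    (a ++ List.replicate m (0 : Int))[k]?.getD 0 = a[k]?.getD 0 := by
  induction a generalizing k with
  | nil =>
    simp only [List.nil_append, List.getElem?_replicate, List.getElem?_nil]
    split <;> simp
  | cons x t ih =>
    cases k with
    | zero => rfl
    | succ n => simpa using ih n

-- B's result, element by element, via getD with default 0
theorem alt_eq_map_range (a : List Int) : ∀ b : List Int,
    getSumTuples_alt a b
      = (List.range (max a.length b.length)).map (fun k => a.getD k 0 + b.getD k 0) := by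
  induction a with
  | nil =>
    intro b
    simp only [getSumTuples_alt, List.zipWith_nil_left, List.drop_nil, List.drop_zero,
      List.nil_append, List.append_nil, List.length_nil, Nat.zero_max]
    apply List.ext_getElem
    · simp
    · intro i p _
      simp [List.getD_eq_getElem?_getD, List.getElem?_eq_getElem p]
  | cons x t ih =>
    intro b
    cases b with
    | nil =>
      simp only [getSumTuples_alt, List.zipWith_nil_right, List.drop_nil, List.drop_zero,
        List.nil_append, List.append_nil, List.length_nil, Nat.max_zero]
      apply List.ext_getElem
      · simp
      · intro i p _
        simp [List.getD_eq_getElem?_getD, List.getElem?_eq_getElem p]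
    | cons y s =>
      have hstep : getSumTuples_alt (x :: t) (y :: s) = (x + y) :: getSumTuples_alt t s := by
        simp [getSumTuples_alt]
      rw [hstep, ih s]
      simp only [List.length_cons]
      have hmax : max (t.length + 1) (s.length + 1) = max t.length s.length + 1 := by omega
      rw [hmax, List.range_succ_eq_map, List.map_cons, List.map_map]
      rfl

theorem getSumTuples_spec : Claim_equal_getSumTuples := by
  intro tup1 tup2 _
  show getSumTuples tup1 tup2 = getSumTuples_alt tup1 tup2
  unfold getSumTuples
  simp only []
  split
  · next h =>
    rw [PySem.List.foldl_append_singleton_eq_map, List.nil_append,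
      PySem.List.pyRange_zero_natCast, List.map_map, alt_eq_map_range]
    have : max tup1.length tup2.length = tup1.length := by omega
    rw [this]
    refine List.map_congr_left fun k _ => ?_
    simp only [Function.comp, PySem.List.pyGetD_natCast, List.getD_eq_getElem?_getD,
      getD_append_replicate_zero]
  · next h =>
    rw [PySem.List.foldl_append_singleton_eq_map, List.nil_append,
      PySem.List.pyRange_zero_natCast, List.map_map, alt_eq_map_range]
    have : max tup1.length tup2.length = tup2.length := by omega
    rw [this]
    refine List.map_congr_left fun k _ => ?_
    simp only [Function.comp, PySem.List.pyGetD_natCast, List.getD_eq_getElem?_getD,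
      getD_append_replicate_zero]
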